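-- pv_equiv track=rewrite | github.com/abhishekverma051/Problem-Solving-with-C-DSA- | python/hack.py | function
-- ===== SOURCE A (Python) =====
-- def function(fatherPos, martinPos, velFather, steps):
--
--     result = [0]* 2
--
--     steps1 = [0] * steps
--
--     for i in range(0, steps):
--
--         steps1[i] = fatherPos + velFather * i - martinPos
--
--     for i in range(0, steps):
--
--         if (steps1[i] <= 0):
--
--             continue
--
--         v2 = steps1[i]
--
--         count = 1
--
--         for j in range(i, steps):
--
--             if (steps1[j] % v2 == 0):
--
--                 count += 1
--
--         if (result[0] <= count):
--
--             result[0] = count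
--
--             result [1] = v2
--
--     return result
-- ===== SOURCE B (Python) =====
-- def _gcd(a, b):
--     while b:
--         a, b = b, a % b
--     return a
--
-- def function(fatherPos, martinPos, velFather, steps):
--     # O(steps): for each positive term a = d + v*i, the later terms divisible by a
--     # are exactly those at offsets that are multiples of p = a // gcd(v, a),
--     # so their number in [i, steps) is ceil((steps - i) / p), computed in O(1).
--     d = fatherPos - martinPos
--     best_count = 0
--     best_v = 0
--     for i in range(steps):
--         a = d + velFather * i
--         if a <= 0:
--             continue
--         p = a // _gcd(velFather, a)
--         cnt = 1 + (steps - i + p - 1) // p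
--         if best_count <= cnt:
--             best_count = cnt
--             best_v = a
--     return [best_count, best_v]
-- ===== Notes on version B (the rewrite author's own statement) =====
-- stated objective: faster
-- what changed: Replaces A's inner scan over all later terms with an O(1) closed form: terms divisible by a = d+v*i occur with exact period p = a//gcd(v,a), so their count in [i,steps) is ceil((steps-i)/p).
import Mathlib
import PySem

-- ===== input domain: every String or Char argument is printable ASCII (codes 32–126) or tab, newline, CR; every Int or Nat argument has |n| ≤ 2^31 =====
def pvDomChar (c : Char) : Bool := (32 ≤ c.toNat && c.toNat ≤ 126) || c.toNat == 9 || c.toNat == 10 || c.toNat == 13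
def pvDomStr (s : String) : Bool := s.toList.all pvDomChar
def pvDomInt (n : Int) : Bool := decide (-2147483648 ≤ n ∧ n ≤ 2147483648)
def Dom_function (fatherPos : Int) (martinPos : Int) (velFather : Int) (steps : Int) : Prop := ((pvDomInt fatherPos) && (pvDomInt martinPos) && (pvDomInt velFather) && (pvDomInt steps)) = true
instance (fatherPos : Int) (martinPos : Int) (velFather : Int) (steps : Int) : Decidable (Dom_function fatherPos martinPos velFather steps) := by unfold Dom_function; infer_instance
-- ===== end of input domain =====

-- B replaces A's O(steps^2) inner divisibility scan by an O(1) closed form per index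
-- (terms divisible by a_i recur with exact period a_i // gcd(velFather, a_i)); objective: faster.

-- ===== PORT A =====
-- steps1[i] is assigned fatherPos + velFather*i - martinPos for every i in range(steps);
-- the fill loop over the preallocated [0]*steps list is ported as this map.
-- Indexing steps1[i] / steps1[j] is always in range, so pyGetD's default 0 is never read.
def function (fatherPos : Int) (martinPos : Int) (velFather : Int) (steps : Int) : List Int :=
  let steps1 : List Int :=
    (PySem.List.pyRange 0 steps 1).map (fun i => fatherPos + velFather * i - martinPos)
  let result : Int × Int :=
    (PySem.List.pyRange 0 steps 1).foldl (fun (result : Int × Int) i =>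
      if PySem.List.pyGetD steps1 i 0 ≤ 0 then result
      else
        let v2 := PySem.List.pyGetD steps1 i 0
        let count := (PySem.List.pyRange i steps 1).foldl
          (fun count j =>
            if PySem.Int.mod (PySem.List.pyGetD steps1 j 0) v2 = 0 then count + 1 else count) 1
        if result.1 ≤ count then (count, v2) else result) (0, 0)
  [result.1, result.2]

-- ===== PORT B =====
-- hand-written Euclid from Source B (_gcd): while b: a, b = b, a % b
def pyGcdB (a b : Int) : Int :=
  if h : b = 0 then a else pyGcdB b (PySem.Int.mod a b)
termination_by b.natAbs
decreasing_by
  rcases lt_or_gt_of_ne h with hb | hb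
  · have h1 := (PySem.Int.mod_neg_bounds a hb).1
    have h2 := (PySem.Int.mod_neg_bounds a hb).2
    omega
  · have h1 := PySem.Int.mod_nonneg a hb
    have h2 := PySem.Int.mod_lt a hb
    omega

def function_alt (fatherPos : Int) (martinPos : Int) (velFather : Int) (steps : Int) : List Int :=
  let d := fatherPos - martinPos
  let r : Int × Int :=
    (PySem.List.pyRange 0 steps 1).foldl (fun (r : Int × Int) i =>
      let a := d + velFather * i
      if a ≤ 0 then r
      else
        let p := PySem.Int.floordiv a (pyGcdB velFather a)
        let cnt := 1 + PySem.Int.floordiv (steps - i + p - 1) p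
        if r.1 ≤ cnt then (cnt, a) else r) (0, 0)
  [r.1, r.2]

-- ===== PRECONDITION & SPEC =====
def Spec_function (fatherPos : Int) (martinPos : Int) (velFather : Int) (steps : Int) (out : List Int) : Prop := out = function_alt fatherPos martinPos velFather steps
instance (fatherPos : Int) (martinPos : Int) (velFather : Int) (steps : Int) (out : List Int) : Decidable (Spec_function fatherPos martinPos velFather steps out) := by unfold Spec_function; infer_instance

-- ===== CLAIM (what is proved, stated in full; the proofs are below) =====
def Claim_equal_function : Prop := ∀ (fatherPos : Int) (martinPos : Int) (velFather : Int) (steps : Int), Dom_function fatherPos martinPos velFather steps → Spec_function fatherPos martinPos velFather steps (function fatherPos martinPos velFather steps)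

-- ===== LEMMAS AND PROOFS =====

-- the (positive) period a // gcd(v, a), as a Nat
def pnat (a v : Int) : Nat := (a / (Int.gcd v a : Int)).toNat

lemma gcd_pos_of_pos (a v : Int) (ha : 0 < a) : 0 < (Int.gcd v a : Int) := by
  have : Int.gcd v a ≠ 0 := by
    simp [Int.gcd_eq_zero_iff]
    intro _ h; omega
  positivity

lemma ediv_gcd_eq (a v p : Int) (hg : (Int.gcd v a : Int) ≠ 0)
    (hp : a = (Int.gcd v a : Int) * p) : a / (Int.gcd v a : Int) = p := by
  have h2 : (Int.gcd v a : Int) * p / (Int.gcd v a : Int) = p :=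
    Int.mul_ediv_cancel_left p hg
  rw [← hp] at h2
  exact h2

lemma pnat_pos (a v : Int) (ha : 0 < a) : 0 < pnat a v := by
  have hg := gcd_pos_of_pos a v ha
  obtain ⟨p, hp⟩ := Int.gcd_dvd_right v a
  have hp' := ediv_gcd_eq a v p (by omega) hp
  have hppos : 0 < p := by nlinarith
  simp only [pnat, hp']
  omega

lemma pnat_cast (a v : Int) (ha : 0 < a) : ((pnat a v : Nat) : Int) = a / (Int.gcd v a : Int) := by
  have hg := gcd_pos_of_pos a v ha
  obtain ⟨p, hp⟩ := Int.gcd_dvd_right v a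
  have hp' := ediv_gcd_eq a v p (by omega) hp
  have hppos : 0 < p := by nlinarith
  simp only [pnat, hp']
  omega

-- key divisibility: a ∣ v*t  ↔  (a / gcd v a) ∣ t
lemma dvd_iff_core (g p v' t : Int) (hgpos : 0 < g) (hcop : IsCoprime v' p) :
    g * p ∣ g * v' * t ↔ p ∣ t := by
  have hassoc : g * v' * t = g * (v' * t) := by ring
  rw [hassoc, mul_dvd_mul_iff_left (show g ≠ 0 by omega)]
  constructor
  · intro h
    exact hcop.symm.dvd_of_dvd_mul_left h
  · intro h
    exact Dvd.dvd.mul_left h v'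

lemma dvd_iff_period (a v t : Int) (ha : 0 < a) :
    a ∣ v * t ↔ ((pnat a v : Nat) : Int) ∣ t := by
  rw [pnat_cast a v ha]
  have hg := gcd_pos_of_pos a v ha
  obtain ⟨p, hp⟩ := Int.gcd_dvd_right v a
  obtain ⟨v', hv'⟩ := Int.gcd_dvd_left v a
  have hpe := ediv_gcd_eq a v p (by omega) hp
  have hcop : IsCoprime (v / (Int.gcd v a : Int)) (a / (Int.gcd v a : Int)) := by
    rw [Int.isCoprime_iff_gcd_eq_one]
    exact Int.gcd_div_gcd_div_gcd (by exact_mod_cast hg)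
  have hve : v / (Int.gcd v a : Int) = v' := by
    have h2 : (Int.gcd v a : Int) * v' / (Int.gcd v a : Int) = v' :=
      Int.mul_ediv_cancel_left v' (by omega)
    rw [← hv'] at h2
    exact h2
  rw [hpe] at hcop ⊢
  rw [hve] at hcop
  have := dvd_iff_core (Int.gcd v a : Int) p v' t hg hcop
  rw [← hp, ← hv'] at this
  exact this

-- number of multiples of P in [0, n)
lemma countP_multiples (P : Nat) (hP : 0 < P) (n : Nat) :
    (List.range n).countP (fun k => decide (P ∣ k)) = (n + P - 1) / P := by
  induction n with
  | zero =>
    simp only [List.range_zero, List.countP_nil]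
    rw [Nat.div_eq_of_lt (by omega)]
  | succ n ih =>
    rw [List.range_succ, List.countP_append, ih]
    have hn : n + 1 + P - 1 = (n + P - 1) + 1 := by omega
    rw [hn, Nat.succ_div]
    have hiff : P ∣ n + P - 1 + 1 ↔ P ∣ n := by
      have he : n + P - 1 + 1 = n + P := by omega
      rw [he]; exact Nat.dvd_add_self_right
    by_cases hd : P ∣ n
    · rw [if_pos (hiff.mpr hd)]
      simp [hd]
    · rw [if_neg (fun h => hd (hiff.mp h))]
      simp [hd]

-- Euclid from Source B computes Int.gcd on a positive second argument
lemma pyGcdB_eq_aux : ∀ (n : Nat) (a b : Int), b.natAbs ≤ n → 0 < b →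
    pyGcdB a b = (Int.gcd a b : Int) := by
  intro n
  induction n with
  | zero => intro a b hle hb; omega
  | succ n ih =>
    intro a b hle hb
    rw [pyGcdB, dif_neg (by omega)]
    have hr0 : 0 ≤ PySem.Int.mod a b := PySem.Int.mod_nonneg a hb
    have hrb : PySem.Int.mod a b < b := PySem.Int.mod_lt a hb
    have hmod : PySem.Int.mod a b = a % b := PySem.Int.mod_eq_emod_of_pos hb
    have hgcd : Int.gcd b (PySem.Int.mod a b) = Int.gcd a b := by
      rw [hmod, Int.emod_def, sub_eq_add_neg, ← mul_neg, mul_comm b (-(a / b)),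
        Int.gcd_add_mul_right_right, Int.gcd_comm]
    rcases eq_or_lt_of_le hr0 with hz | hpos
    · rw [← hz, pyGcdB]
      simp
      have : b ∣ a := by
        rw [← PySem.Int.mod_eq_zero_iff_dvd]; omega
      rw [Int.gcd_eq_natAbs_right this]
      omega
    · rw [ih b (PySem.Int.mod a b) (by omega) hpos, hgcd]

lemma pyGcdB_eq (a b : Int) (hb : 0 < b) : pyGcdB a b = (Int.gcd a b : Int) :=
  pyGcdB_eq_aux b.natAbs a b le_rfl hb

-- the inner count of A equals the closed form of B
lemma count_eq (fatherPos martinPos velFather steps i : Int)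
    (h0 : 0 ≤ i) (hi : i < steps)
    (ha : 0 < fatherPos + velFather * i - martinPos) :
    (PySem.List.pyRange i steps 1).foldl
      (fun count j =>
        if PySem.Int.mod
            (PySem.List.pyGetD
              ((PySem.List.pyRange 0 steps 1).map (fun k => fatherPos + velFather * k - martinPos)) j 0)
            (fatherPos + velFather * i - martinPos) = 0
         then count + 1 else count) 1
    = 1 + PySem.Int.floordiv
        (steps - i + PySem.Int.floordiv (fatherPos + velFather * i - martinPos)
            (pyGcdB velFather (fatherPos + velFather * i - martinPos)) - 1)
        (PySem.Int.floordiv (fatherPos + velFather * i - martinPos)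
            (pyGcdB velFather (fatherPos + velFather * i - martinPos))) := by
  set a : Int := fatherPos + velFather * i - martinPos with hadef
  set P : Nat := pnat a velFather with hPdef
  have hPpos : 0 < P := pnat_pos a velFather ha
  have hg := gcd_pos_of_pos a velFather ha
  -- B's p is ↑P
  have hp : PySem.Int.floordiv a (pyGcdB velFather a) = (P : Int) := by
    rw [pyGcdB_eq velFather a ha, PySem.Int.floordiv_eq_ediv_of_pos hg,
      pnat_cast a velFather ha]
  rw [hp]
  -- replace the array lookup by the value it holds
  have h1 := PySem.List.foldl_congr_mem (PySem.List.pyRange i steps 1)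
    (fun (count : Int) j =>
      if PySem.Int.mod
          (PySem.List.pyGetD
            ((PySem.List.pyRange 0 steps 1).map (fun k => fatherPos + velFather * k - martinPos)) j 0)
          a = 0
       then count + 1 else count)
    (fun (count : Int) j => if PySem.Int.mod (fatherPos + velFather * j - martinPos) a = 0
       then count + 1 else count)
    (1 : Int)
    (by
      intro acc x hx
      rw [PySem.List.mem_pyRange_one] at hx
      simp only [PySem.List.pyGetD_map_pyRange_of_nonneg _ _ _ _ (by omega : (0:Int) ≤ x)
        (by omega : x < steps)])
  rw [h1]
  rw [PySem.List.foldl_ite_add_one]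
  rw [PySem.List.pyRange_one i steps, List.countP_map]
  have hcongr : ∀ k ∈ List.range (steps - i).toNat,
      ((fun x => decide (PySem.Int.mod (fatherPos + velFather * x - martinPos) a = 0)) ∘
        fun k : Nat => i + (k : Int)) k = true ↔ (fun k => decide (P ∣ k)) k = true := by
    intro k _
    simp only [Function.comp_apply, decide_eq_true_eq]
    have hx : fatherPos + velFather * (i + (k : Int)) - martinPos = a + velFather * (k : Int) := by
      rw [hadef]; ring
    rw [hx, PySem.Int.mod_eq_zero_iff_dvd, dvd_add_right (dvd_refl a),
      dvd_iff_period a velFather (k : Int) ha, ← hPdef, Int.natCast_dvd_natCast]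
  rw [List.countP_congr hcongr]
  rw [countP_multiples P hPpos]
  -- arithmetic on the right side
  rw [PySem.Int.floordiv_eq_ediv_of_pos (show (0:Int) < (P:Int) by exact_mod_cast hPpos)]
  have hnum : steps - i + (P : Int) - 1 = (((steps - i).toNat + P - 1 : Nat) : Int) := by
    omega
  rw [hnum, ← Int.natCast_div]

-- ===== VERDICT (by name: the statement is the Claim_ definition above) =====
theorem function_spec : Claim_equal_function := by
  intro fatherPos martinPos velFather steps _
  unfold Spec_function function function_alt
  simp only []
  have hfold := PySem.List.foldl_congr_mem (PySem.List.pyRange 0 steps 1)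
    (fun (result : Int × Int) i =>
      if PySem.List.pyGetD
          ((PySem.List.pyRange 0 steps 1).map (fun i => fatherPos + velFather * i - martinPos)) i 0 ≤ 0
      then result
      else
        if result.1 ≤
            (PySem.List.pyRange i steps 1).foldl
              (fun (count : Int) j =>
                if PySem.Int.mod
                    (PySem.List.pyGetD
                      ((PySem.List.pyRange 0 steps 1).map (fun i => fatherPos + velFather * i - martinPos)) j 0)
                    (PySem.List.pyGetD
                      ((PySem.List.pyRange 0 steps 1).map (fun i => fatherPos + velFather * i - martinPos)) i 0)
                    = 0
                 then count + 1 else count) 1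
        then
          ((PySem.List.pyRange i steps 1).foldl
              (fun (count : Int) j =>
                if PySem.Int.mod
                    (PySem.List.pyGetD
                      ((PySem.List.pyRange 0 steps 1).map (fun i => fatherPos + velFather * i - martinPos)) j 0)
                    (PySem.List.pyGetD
                      ((PySem.List.pyRange 0 steps 1).map (fun i => fatherPos + velFather * i - martinPos)) i 0)
                    = 0
                 then count + 1 else count) 1,
           PySem.List.pyGetD
              ((PySem.List.pyRange 0 steps 1).map (fun i => fatherPos + velFather * i - martinPos)) i 0)
        else result)
    (fun (r : Int × Int) i =>
      if fatherPos - martinPos + velFather * i ≤ 0 then r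
      else
        if r.1 ≤
            1 + PySem.Int.floordiv
              (steps - i + PySem.Int.floordiv (fatherPos - martinPos + velFather * i)
                  (pyGcdB velFather (fatherPos - martinPos + velFather * i)) - 1)
              (PySem.Int.floordiv (fatherPos - martinPos + velFather * i)
                  (pyGcdB velFather (fatherPos - martinPos + velFather * i)))
        then
          (1 + PySem.Int.floordiv
              (steps - i + PySem.Int.floordiv (fatherPos - martinPos + velFather * i)
                  (pyGcdB velFather (fatherPos - martinPos + velFather * i)) - 1)
              (PySem.Int.floordiv (fatherPos - martinPos + velFather * i)
                  (pyGcdB velFather (fatherPos - martinPos + velFather * i))),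
           fatherPos - martinPos + velFather * i)
        else r)
    ((0 : Int), (0 : Int))
    (by
      intro acc i hi
      rw [PySem.List.mem_pyRange_one] at hi
      simp only [PySem.List.pyGetD_map_pyRange_of_nonneg _ _ _ _ hi.1 hi.2]
      have hval : fatherPos - martinPos + velFather * i = fatherPos + velFather * i - martinPos := by
        ring
      rw [hval]
      by_cases hle : fatherPos + velFather * i - martinPos ≤ 0
      · simp [hle]
      · simp only [if_neg hle]
        rw [count_eq fatherPos martinPos velFather steps i hi.1 hi.2 (by omega)])
  rw [hfold]
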